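-- pv_equiv track=rewrite | github.com/andrei-shtanakov/spec-runner | src/spec_runner/validate.py | _suggest_key
-- ===== SOURCE A (Python) =====
-- def _levenshtein(s1: str, s2: str) -> int:
--     """Compute the Levenshtein (edit) distance between two strings."""
--     if len(s1) < len(s2):
--         return _levenshtein(s2, s1)
--
--     if not s2:
--         return len(s1)
--
--     prev_row = list(range(len(s2) + 1))
--     for i, c1 in enumerate(s1):
--         curr_row = [i + 1]
--         for j, c2 in enumerate(s2):
--             # Insertion, deletion, substitution
--             cost = 0 if c1 == c2 else 1
--             curr_row.append(min(curr_row[j] + 1, prev_row[j + 1] + 1, prev_row[j] + cost))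
--         prev_row = curr_row
--
--     return prev_row[-1]
--
-- def _suggest_key(unknown: str, known: set[str]) -> str | None:
--     """Suggest the closest known key if Levenshtein distance <= 2.
--
--     Args:
--         unknown: The unrecognised key.
--         known: Set of valid key names.
--
--     Returns:
--         The best suggestion, or None if nothing is close enough.
--     """
--     best: str | None = None
--     best_dist = 3  # threshold: only suggest if distance <= 2
--     for k in sorted(known):  # sorted for deterministic results
--         d = _levenshtein(unknown, k)
--         if d < best_dist:
--             best = k
--             best_dist = d
--     return best
-- ===== SOURCE B (Python) =====
-- def _levenshtein_memo(s1: str, s2: str) -> int: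
--     """Top-down memoized edit distance.
--
--     edit(i, j) is the Levenshtein distance between the prefixes s1[:i] and
--     s2[:j]; results are cached in a dict, so each index pair is computed once.
--     No length-based argument swap is needed (the recurrence is symmetric).
--     """
--     memo = {}
--
--     def edit(i, j):
--         if i == 0:
--             return j
--         if j == 0:
--             return i
--         key = (i, j)
--         v = memo.get(key)
--         if v is None:
--             if s1[i - 1] == s2[j - 1]:
--                 v = edit(i - 1, j - 1)
--             else:
--                 v = 1 + min(edit(i - 1, j), edit(i, j - 1), edit(i - 1, j - 1))
--             memo[key] = v
--         return v
--
--     return edit(len(s1), len(s2))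
--
--
-- def _suggest_key(unknown: str, known: "set[str]") -> "str | None":
--     best = None
--     best_dist = 3  # threshold: only suggest if distance <= 2
--     for k in sorted(known):  # sorted for deterministic results
--         d = _levenshtein_memo(unknown, k)
--         if d < best_dist:
--             best = k
--             best_dist = d
--     return best
-- ===== Notes on version B (the rewrite author's own statement) =====
-- stated objective: faster
-- what changed: The bottom-up Wagner-Fischer row DP (with a length-based argument swap) is replaced by a top-down memoized recursion edit(i,j) over index pairs with a match shortcut and no swap; the wrapper scan is unchanged.
import Mathlib
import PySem

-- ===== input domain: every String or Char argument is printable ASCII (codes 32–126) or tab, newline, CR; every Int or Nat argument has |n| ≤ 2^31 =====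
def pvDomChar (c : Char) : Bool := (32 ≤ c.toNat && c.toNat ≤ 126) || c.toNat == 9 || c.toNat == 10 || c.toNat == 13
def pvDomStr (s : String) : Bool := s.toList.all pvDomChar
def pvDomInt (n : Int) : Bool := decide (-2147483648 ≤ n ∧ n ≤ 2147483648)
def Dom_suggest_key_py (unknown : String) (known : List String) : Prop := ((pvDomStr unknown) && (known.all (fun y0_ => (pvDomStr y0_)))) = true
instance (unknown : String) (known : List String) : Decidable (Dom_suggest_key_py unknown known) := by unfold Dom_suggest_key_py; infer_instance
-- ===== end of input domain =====

-- B replaces A's bottom-up one-row Wagner–Fischer DP (with a length-based argument swap)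
-- by a top-down memoized recursion edit(i,j) over index pairs; same values, same wrapper scan.

-- ===== PORT A =====
-- inner loop body: curr_row.append(min(curr_row[j]+1, prev_row[j+1]+1, prev_row[j]+cost))
def pvStepA (prev : List Nat) (c1 : Char) (curr : List Nat) (cj : Char × Nat) : List Nat :=
  let cost : Nat := if c1 == cj.1 then 0 else 1
  curr ++ [min (min (curr.getD cj.2 0 + 1) (prev.getD (cj.2 + 1) 0 + 1)) (prev.getD cj.2 0 + cost)]

-- one outer iteration: 'curr_row = [i + 1]; for j, c2 in enumerate(s2): …'
-- ('for j, c2 in enumerate(s2)' is ported as a fold over s2.zipIdx: the value/index pairs)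
def pvRowA (t : List Char) (prev : List Nat) (ci : Char × Nat) : List Nat :=
  t.zipIdx.foldl (pvStepA prev ci.1) [ci.2 + 1]

-- the DP core of _levenshtein after the two early returns: rows over s1, return prev_row[-1]
-- (prev_row is always non-empty, so prev_row[-1] is its last element, read with getD)
def pvDP (s t : List Char) : Nat :=
  let last := s.zipIdx.foldl (pvRowA t) (List.range (t.length + 1))
  last.getD (last.length - 1) 0

-- _levenshtein: the swap recursion, the empty-s2 return, then the DP
def lev_py (s1 s2 : List Char) : Nat :=
  if s1.length < s2.length then lev_py s2 s1
  else if s2.isEmpty then s1.length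
  else pvDP s1 s2
termination_by (if s1.length < s2.length then 1 else 0)
decreasing_by simp_all; omega

def suggest_key_py (unknown : String) (known : List String) : Option String :=
  ((PySem.List.sorted known (fun x => x)).foldl
    (fun (st : Option String × Nat) k =>
      let d := lev_py unknown.toList k.toList
      if d < st.2 then (some k, d) else st)
    (none, 3)).1

-- ===== PORT B =====
-- Source B's edit(i, j): distance between the prefixes s1[:i] and s2[:j].
-- (The dict memoisation is an evaluation cache and does not change the value computed;
--  the port is the same recursion without the cache.)
def editAlt (s t : List Char) : Nat → Nat → Nat
  | 0, j => j
  | i + 1, 0 => i + 1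
  | i + 1, j + 1 =>
    if s.getD i ' ' == t.getD j ' ' then editAlt s t i j
    else 1 + min (editAlt s t i (j + 1)) (min (editAlt s t (i + 1) j) (editAlt s t i j))
termination_by i j => (i, j)

def levMemoAlt (s1 s2 : List Char) : Nat := editAlt s1 s2 s1.length s2.length

def suggest_key_py_alt (unknown : String) (known : List String) : Option String :=
  ((PySem.List.sorted known (fun x => x)).foldl
    (fun (st : Option String × Nat) k =>
      let d := levMemoAlt unknown.toList k.toList
      if d < st.2 then (some k, d) else st)
    (none, 3)).1

-- ===== PRECONDITION & SPEC =====
def Spec_suggest_key_py (unknown : String) (known : List String) (out : Option String) : Prop := out = suggest_key_py_alt unknown known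
instance (unknown : String) (known : List String) (out : Option String) : Decidable (Spec_suggest_key_py unknown known out) := by unfold Spec_suggest_key_py; infer_instance

-- ===== CLAIM (what is proved, stated in full; the proofs are below) =====
def Claim_equal_suggest_key_py : Prop := ∀ (unknown : String) (known : List String), Dom_suggest_key_py unknown known → Spec_suggest_key_py unknown known (suggest_key_py unknown known)

-- ===== LEMMAS AND PROOFS =====

lemma editAlt_zero_right (s t : List Char) (i : Nat) : editAlt s t i 0 = i := by
  cases i <;> simp [editAlt]

-- the four Lipschitz bounds of the edit-distance table, proved together by induction on i+j
lemma editAlt_mono (s t : List Char) : ∀ n i j, i + j ≤ n →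
    (editAlt s t i j ≤ editAlt s t (i+1) j + 1 ∧ editAlt s t (i+1) j ≤ editAlt s t i j + 1 ∧
     editAlt s t i j ≤ editAlt s t i (j+1) + 1 ∧ editAlt s t i (j+1) ≤ editAlt s t i j + 1) := by
  intro n
  induction n with
  | zero =>
    intro i j h
    obtain ⟨rfl, rfl⟩ : i = 0 ∧ j = 0 := by omega
    simp [editAlt]
  | succ n ih =>
    intro i j h
    match i, j with
    | 0, 0 => simp [editAlt]
    | 0, j + 1 =>
      obtain ⟨h1, h2, h3, h4⟩ := ih 0 j (by omega)
      simp only [editAlt] at *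
      split_ifs <;> omega
    | i + 1, 0 =>
      obtain ⟨h1, h2, h3, h4⟩ := ih i 0 (by omega)
      simp only [editAlt] at *
      split_ifs <;> omega
    | i + 1, j + 1 =>
      obtain ⟨a1, a2, a3, a4⟩ := ih i j (by omega)
      obtain ⟨b1, b2, b3, b4⟩ := ih (i+1) j (by omega)
      obtain ⟨c1, c2, c3, c4⟩ := ih i (j+1) (by omega)
      simp only [editAlt] at *
      split_ifs at * <;> omega

-- A's three-way min formula for a cell equals B's recursion (match shortcut included)
lemma editAlt_minform (s t : List Char) (i j : Nat) :
    min (min (editAlt s t (i+1) j + 1) (editAlt s t i (j+1) + 1))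
        (editAlt s t i j + (if s.getD i ' ' == t.getD j ' ' then 0 else 1))
      = editAlt s t (i+1) (j+1) := by
  obtain ⟨h1, h2, h3, h4⟩ := editAlt_mono s t (i + j) i j (le_refl _)
  simp only [editAlt]
  split_ifs <;> omega

lemma editAlt_symm (s t : List Char) : ∀ n i j, i + j ≤ n → editAlt s t i j = editAlt t s j i := by
  intro n
  induction n with
  | zero =>
    intro i j h
    obtain ⟨rfl, rfl⟩ : i = 0 ∧ j = 0 := by omega
    simp [editAlt]
  | succ n ih =>
    intro i j h
    match i, j with
    | 0, 0 => simp [editAlt]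
    | 0, j + 1 => simp [editAlt]
    | i + 1, 0 => simp [editAlt]
    | i + 1, j + 1 =>
      have e1 := ih i j (by omega)
      have e2 := ih (i+1) j (by omega)
      have e3 := ih i (j+1) (by omega)
      simp only [editAlt]
      rw [Bool.beq_comm (b := t.getD j ' '), e1, e2, e3]
      split_ifs <;> omega

-- one inner loop over the remaining suffix of t extends a correct row prefix to the full next row
lemma pvRow_inv (s t : List Char) (i : Nat) :
    ∀ (u : List Char) (j : Nat) (curr : List Nat),
      u = t.drop j → j ≤ t.length →
      curr = (List.range (j+1)).map (fun jj => editAlt s t (i+1) jj) →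
      (u.zipIdx j).foldl (pvStepA ((List.range (t.length+1)).map (fun jj => editAlt s t i jj)) (s.getD i ' ')) curr
        = (List.range (t.length+1)).map (fun jj => editAlt s t (i+1) jj) := by
  intro u
  induction u with
  | nil =>
    intro j curr hu hj hc
    have hjt : j = t.length := by
      by_contra hne
      rw [List.drop_eq_getElem_cons (by omega)] at hu
      exact absurd hu.symm (List.cons_ne_nil _ _)
    subst hjt
    simpa using hc
  | cons c u' ihu =>
    intro j curr hu hj hc
    have hjlt : j < t.length := by
      by_contra hge
      rw [List.drop_eq_nil_iff.mpr (by omega)] at hu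
      simp at hu
    rw [List.drop_eq_getElem_cons hjlt] at hu
    have hcval : t[j] = c := ((List.cons.injEq _ _ _ _).mp hu.symm).1
    have hu' : t.drop (j+1) = u' := ((List.cons.injEq _ _ _ _).mp hu.symm).2
    rw [List.zipIdx_cons, List.foldl_cons]
    apply ihu (j+1) _ hu'.symm (by omega)
    -- the appended cell equals the (j+1)-st entry of the next row
    have ht : t.getD j ' ' = c := by rw [List.getD_eq_getElem _ _ hjlt, hcval]
    rw [hc]
    unfold pvStepA
    rw [show List.range (j+1+1) = List.range (j+1) ++ [j+1] from List.range_succ,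
        List.map_append]
    simp only [List.map_cons, List.map_nil]
    rw [PySem.List.getD_map_range _ _ _ _ (Nat.lt_succ_self j),
        PySem.List.getD_map_range _ _ _ _ (by omega),
        PySem.List.getD_map_range _ _ _ _ (by omega), ← ht,
        editAlt_minform s t i j]

-- the outer loop over the remaining suffix of s turns row i into the final row
lemma pvDP_inv (s t : List Char) :
    ∀ (u : List Char) (i : Nat) (prev : List Nat),
      u = s.drop i → i ≤ s.length →
      prev = (List.range (t.length+1)).map (fun jj => editAlt s t i jj) →
      (u.zipIdx i).foldl (pvRowA t) prev
        = (List.range (t.length+1)).map (fun jj => editAlt s t s.length jj) := by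
  intro u
  induction u with
  | nil =>
    intro i prev hu hi hp
    have his : i = s.length := by
      by_contra hne
      rw [List.drop_eq_getElem_cons (by omega)] at hu
      exact absurd hu.symm (List.cons_ne_nil _ _)
    subst his
    simpa using hp
  | cons c u' ihu =>
    intro i prev hu hi hp
    have hilt : i < s.length := by
      by_contra hge
      rw [List.drop_eq_nil_iff.mpr (by omega)] at hu
      simp at hu
    rw [List.drop_eq_getElem_cons hilt] at hu
    have hcval : s[i] = c := ((List.cons.injEq _ _ _ _).mp hu.symm).1
    have hu' : s.drop (i+1) = u' := ((List.cons.injEq _ _ _ _).mp hu.symm).2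
    rw [List.zipIdx_cons, List.foldl_cons]
    apply ihu (i+1) _ hu'.symm (by omega)
    have hs : s.getD i ' ' = c := by rw [List.getD_eq_getElem _ _ hilt, hcval]
    rw [hp]
    unfold pvRowA
    have hrow := pvRow_inv s t i t 0 [i+1] (by simp) (by omega) (by simp [editAlt])
    rw [hs] at hrow
    simpa using hrow

lemma pvDP_eq (s t : List Char) : pvDP s t = editAlt s t s.length t.length := by
  unfold pvDP
  have hinit : (List.range (t.length+1) : List Nat)
      = (List.range (t.length+1)).map (fun jj => editAlt s t 0 jj) := by
    have : (fun jj => editAlt s t 0 jj) = (fun jj => jj) := by funext jj; simp [editAlt]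
    rw [this, List.map_id']
  have h := pvDP_inv s t s 0 (List.range (t.length+1)) (by simp) (by omega) hinit
  rw [h]
  show (List.map (fun jj => editAlt s t s.length jj) (List.range (t.length+1))).getD
      ((List.map (fun jj => editAlt s t s.length jj) (List.range (t.length+1))).length - 1) 0
      = editAlt s t s.length t.length
  rw [List.length_map, List.length_range]
  exact PySem.List.getD_map_range (fun jj => editAlt s t s.length jj) (t.length+1) t.length 0 (Nat.lt_succ_self _)

lemma lev_py_eq (s t : List Char) : lev_py s t = editAlt s t s.length t.length := by
  have core : ∀ a b : List Char, ¬ a.length < b.length →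
      (if b.isEmpty then a.length else pvDP a b) = editAlt a b a.length b.length := by
    intro a b _
    by_cases hb : b.isEmpty
    · rw [if_pos hb]
      have : b.length = 0 := by simpa [List.isEmpty_iff_length_eq_zero] using hb
      rw [this, editAlt_zero_right]
    · rw [if_neg hb, pvDP_eq]
  rw [lev_py]
  by_cases h : s.length < t.length
  · rw [if_pos h, lev_py, if_neg (by omega)]
    rw [core t s (by omega)]
    exact editAlt_symm t s (t.length + s.length) t.length s.length (le_refl _)
  · rw [if_neg h, core s t h]

lemma suggest_eq (unknown : String) (known : List String) :
    suggest_key_py unknown known = suggest_key_py_alt unknown known := by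
  unfold suggest_key_py suggest_key_py_alt
  congr 1
  apply PySem.List.foldl_congr_mem
  intro st k _
  simp only [levMemoAlt, lev_py_eq]

-- ===== VERDICT (by name: the statement is the Claim_ definition above) =====
theorem suggest_key_py_spec : Claim_equal_suggest_key_py := by
  intro unknown known _
  unfold Spec_suggest_key_py
  exact suggest_eq unknown known
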